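-- pv_equiv track=rewrite | github.com/oceanwhiskey/Mathenacht2024 | str8ts_solver.py | get_compartment_limits
-- ===== SOURCE A (Python) =====
-- def get_compartment_limits(vector):
--     ''' Splits a 1d vector into straits '''
--     blocked = True
--     start_idx = 0
--     str8ts = []
--     for idx, el in enumerate(vector):
--         if blocked and el == 0:# new beghinning
--             start_idx = idx
--             blocked = False
--         if not blocked and el == 1:# new end
--             end_idx = idx - 1
--             blocked = True
--             if start_idx < end_idx: # compartments of length one are useless for analysis
--                 str8ts.append((start_idx, end_idx))
--     if not blocked:
--         end_idx = len(vector) - 1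
--         if start_idx < end_idx:
--             str8ts.append((start_idx, len(vector)-1))
--     return str8ts
-- ===== SOURCE B (Python) =====
-- def get_compartment_limits(vector):
--     ''' Splits a 1d vector into straits '''
--     str8ts = []
--     s = 0
--     rest = vector
--     while True:
--         if 1 in rest:
--             k = rest.index(1)
--             seg = rest[:k]
--             nxt = rest[k + 1:]
--         else:
--             seg = rest
--             nxt = None
--         end = s + len(seg) - 1
--         if 0 in seg:
--             start = s + seg.index(0)
--             if start < end:
--                 str8ts.append((start, end))
--         if nxt is None:
--             return str8ts
--         s = end + 2
--         rest = nxt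
-- ===== Notes on version B (the rewrite author's own statement) =====
-- stated objective: alternative
-- what changed: Replaces the single stateful blocked-flag scan with a two-phase split: repeatedly cut the vector at the first separator (value 1) and handle each segment independently by locating its first 0 via index().
import Mathlib
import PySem

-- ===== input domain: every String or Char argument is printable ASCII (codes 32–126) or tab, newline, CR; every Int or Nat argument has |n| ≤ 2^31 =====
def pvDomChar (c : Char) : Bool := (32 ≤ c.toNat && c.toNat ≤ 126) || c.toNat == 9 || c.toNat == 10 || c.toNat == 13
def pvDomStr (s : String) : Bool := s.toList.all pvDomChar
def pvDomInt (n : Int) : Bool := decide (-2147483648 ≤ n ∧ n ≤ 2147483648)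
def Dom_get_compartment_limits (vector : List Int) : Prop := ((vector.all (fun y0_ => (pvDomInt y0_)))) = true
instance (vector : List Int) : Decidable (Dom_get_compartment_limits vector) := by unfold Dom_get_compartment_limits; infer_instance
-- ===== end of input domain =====

-- B replaces A's single stateful blocked-flag pass by splitting the vector at the
-- separators (value 1) and handling each segment independently (objective: alternative).

-- ===== PORT A =====
-- loop body of A's for-loop: state (blocked, start_idx, str8ts), element (idx, el)
def pvStepA (st : Bool × Int × List (Int × Int)) (p : Int × Int) : Bool × Int × List (Int × Int) :=
  let (blocked, start_idx, str8ts) := st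
  let (idx, el) := p
  -- if blocked and el == 0: start_idx = idx; blocked = False
  let (blocked, start_idx) := if blocked = true ∧ el = 0 then (false, idx) else (blocked, start_idx)
  -- if not blocked and el == 1: close at idx - 1
  if blocked = false ∧ el = 1 then
    (true, start_idx, if start_idx < idx - 1 then str8ts ++ [(start_idx, idx - 1)] else str8ts)
  else
    (blocked, start_idx, str8ts)

def get_compartment_limits (vector : List Int) : List (Int × Int) :=
  let st := (PySem.List.enumerate vector).foldl pvStepA (true, 0, [])
  -- if not blocked: trailing compartment ending at len(vector) - 1
  if st.1 = false ∧ st.2.1 < (vector.length : Int) - 1 then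
    st.2.2 ++ [(st.2.1, (vector.length : Int) - 1)]
  else st.2.2

-- ===== PORT B =====
-- Source B's _compartment(seg, s, str8ts): append (s + seg.index(0), s + len(seg) - 1) when proper
def pvCompartment (seg : List Int) (s : Int) (str8ts : List (Int × Int)) : List (Int × Int) :=
  let endd := s + (seg.length : Int) - 1
  if (0 : Int) ∈ seg then
    match PySem.List.index? seg 0 with
    | some j => if s + (j : Int) < endd then str8ts ++ [(s + (j : Int), endd)] else str8ts
    | none => str8ts
  else str8ts

-- Source B's while loop: cut at the first 1; rest[:k] / rest[k+1:] are take/drop (k ≥ 0, exact)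
def pvBLoop (s : Int) (rest : List Int) (str8ts : List (Int × Int)) : List (Int × Int) :=
  match h : PySem.List.index? rest 1 with
  | some k =>
      -- end = s + len(seg) - 1; next s = end + 2
      pvBLoop (s + ((rest.take k).length : Int) - 1 + 2) (rest.drop (k + 1))
        (pvCompartment (rest.take k) s str8ts)
  | none => pvCompartment rest s str8ts
termination_by rest.length
decreasing_by
  have hm : (1 : Int) ∈ rest := (PySem.List.index?_isSome_iff rest 1).mp (by rw [h]; rfl)
  have hp : 0 < rest.length := List.length_pos_iff.mpr (by rintro rfl; simp at hm)
  simp only [List.length_drop]; omega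

def get_compartment_limits_alt (vector : List Int) : List (Int × Int) :=
  pvBLoop 0 vector []

-- ===== PRECONDITION & SPEC =====
def Spec_get_compartment_limits (vector : List Int) (out : List (Int × Int)) : Prop := out = get_compartment_limits_alt vector
instance (vector : List Int) (out : List (Int × Int)) : Decidable (Spec_get_compartment_limits vector out) := by unfold Spec_get_compartment_limits; infer_instance

-- ===== CLAIM (what is proved, stated in full; the proofs are below) =====
def Claim_equal_get_compartment_limits : Prop := ∀ (vector : List Int), Dom_get_compartment_limits vector → Spec_get_compartment_limits vector (get_compartment_limits vector)

-- ===== LEMMAS AND PROOFS =====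

-- reference semantics: the two states of A's automaton, as mutual structural recursion
mutual
def pvBlockedRun : List Int → Int → List (Int × Int)
  | [], _ => []
  | x :: xs, i => if x = 0 then pvOpenRun i xs (i + 1) else pvBlockedRun xs (i + 1)
def pvOpenRun (start : Int) : List Int → Int → List (Int × Int)
  | [], i => if start < i - 1 then [(start, i - 1)] else []
  | x :: xs, i =>
      if x = 1 then
        (if start < i - 1 then (start, i - 1) :: pvBlockedRun xs (i + 1) else pvBlockedRun xs (i + 1))
      else pvOpenRun start xs (i + 1)
end

-- value a segment (no 1 inside) contributes, at offset s
def pvCompVal (seg : List Int) (s : Int) : List (Int × Int) :=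
  match PySem.List.index? seg 0 with
  | some j => if s + (j : Int) < s + (seg.length : Int) - 1 then [(s + (j : Int), s + (seg.length : Int) - 1)] else []
  | none => []

theorem pvCompartment_eq (seg : List Int) (s : Int) (acc : List (Int × Int)) :
    pvCompartment seg s acc = acc ++ pvCompVal seg s := by
  unfold pvCompartment pvCompVal
  rcases h : PySem.List.index? seg 0 with _ | j
  · have : (0 : Int) ∉ seg := (PySem.List.index?_eq_none_iff seg 0).mp h
    simp [this]
  · have : (0 : Int) ∈ seg := (PySem.List.index?_isSome_iff seg 0).mp (by rw [h]; rfl)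
    simp [this, h]
    split <;> simp

theorem pvOpenRun_no_one (xs : List Int) (start i : Int) (h : (1 : Int) ∉ xs) :
    pvOpenRun start xs i =
      if start < i + (xs.length : Int) - 1 then [(start, i + (xs.length : Int) - 1)] else [] := by
  induction xs generalizing i with
  | nil => simp [pvOpenRun]
  | cons x xs ih =>
      have hx : x ≠ 1 := fun hx => h (hx ▸ List.mem_cons_self)
      have hxs : (1 : Int) ∉ xs := fun hm => h (List.mem_cons_of_mem _ hm)
      have := ih (i + 1) hxs
      simp only [pvOpenRun, hx, if_neg hx, this, List.length_cons]
      have : i + 1 + (xs.length : Int) - 1 = i + ((xs.length : Int) + 1) - 1 := by push_cast; ring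
      rw [this]; push_cast; ring_nf

theorem pvCompVal_cons_ne (x : Int) (xs : List Int) (s : Int) (hx : x ≠ 0) :
    pvCompVal (x :: xs) s = pvCompVal xs (s + 1) := by
  unfold pvCompVal
  rw [PySem.List.index?_cons_of_ne xs hx]
  rcases h : PySem.List.index? xs 0 with _ | j
  · simp
  · simp only [h, Option.map_some, List.length_cons]
    have h1 : s + ((j : Int) + 1) = s + 1 + (j : Int) := by ring
    have h2 : s + (((xs.length : Int)) + 1) - 1 = s + 1 + (xs.length : Int) - 1 := by ring
    push_cast
    rw [h1, h2]

theorem pvBlockedRun_no_one (seg : List Int) (s : Int) (h : (1 : Int) ∉ seg) :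
    pvBlockedRun seg s = pvCompVal seg s := by
  induction seg generalizing s with
  | nil => simp [pvBlockedRun, pvCompVal, PySem.List.index?]
  | cons x xs ih =>
      have hxs : (1 : Int) ∉ xs := fun hm => h (List.mem_cons_of_mem _ hm)
      by_cases hx : x = 0
      · subst hx
        rw [show pvBlockedRun (0 :: xs) s = pvOpenRun s xs (s + 1) by simp [pvBlockedRun]]
        rw [pvOpenRun_no_one xs s (s + 1) hxs]
        unfold pvCompVal
        rw [PySem.List.index?_cons_self]
        simp only [List.length_cons]
        have : s + 1 + (xs.length : Int) - 1 = s + (((xs.length : Int)) + 1) - 1 := by ring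
        rw [this]; push_cast; norm_num
      · rw [show pvBlockedRun (x :: xs) s = pvBlockedRun xs (s + 1) by simp [pvBlockedRun, hx]]
        rw [ih (s + 1) hxs, pvCompVal_cons_ne x xs s hx]

theorem pvOpenRun_split (xs suf : List Int) (start i : Int) (h : (1 : Int) ∉ xs) :
    pvOpenRun start (xs ++ 1 :: suf) i =
      (if start < i + (xs.length : Int) - 1 then [(start, i + (xs.length : Int) - 1)] else [])
        ++ pvBlockedRun suf (i + (xs.length : Int) + 1) := by
  induction xs generalizing i with
  | nil =>
      simp only [List.nil_append, pvOpenRun, List.length_nil]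
      norm_num
      split <;> simp
  | cons x xs ih =>
      have hx : x ≠ 1 := fun hx => h (hx ▸ List.mem_cons_self)
      have hxs : (1 : Int) ∉ xs := fun hm => h (List.mem_cons_of_mem _ hm)
      simp only [List.cons_append, pvOpenRun, if_neg hx, ih (i + 1) hxs, List.length_cons]
      have h1 : i + 1 + (xs.length : Int) - 1 = i + (((xs.length : Int)) + 1) - 1 := by ring
      have h2 : i + 1 + (xs.length : Int) + 1 = i + (((xs.length : Int)) + 1) + 1 := by ring
      rw [h1, h2]; push_cast; ring_nf

theorem pvBlockedRun_split (pre suf : List Int) (s : Int) (h : (1 : Int) ∉ pre) :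
    pvBlockedRun (pre ++ 1 :: suf) s =
      pvCompVal pre s ++ pvBlockedRun suf (s + (pre.length : Int) + 1) := by
  induction pre generalizing s with
  | nil =>
      simp only [List.nil_append, List.length_nil]
      rw [show pvBlockedRun (1 :: suf) s = pvBlockedRun suf (s + 1) by simp [pvBlockedRun]]
      simp [pvCompVal, PySem.List.index?]
  | cons x xs ih =>
      have hxs : (1 : Int) ∉ xs := fun hm => h (List.mem_cons_of_mem _ hm)
      by_cases hx : x = 0
      · subst hx
        rw [show pvBlockedRun ((0 :: xs) ++ 1 :: suf) s = pvOpenRun s (xs ++ 1 :: suf) (s + 1) by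
          simp [pvBlockedRun]]
        rw [pvOpenRun_split xs suf s (s + 1) hxs]
        unfold pvCompVal
        rw [PySem.List.index?_cons_self]
        simp only [List.length_cons]
        have h1 : s + 1 + (xs.length : Int) - 1 = s + (((xs.length : Int)) + 1) - 1 := by ring
        have h2 : s + 1 + (xs.length : Int) + 1 = s + (((xs.length : Int)) + 1) + 1 := by ring
        rw [h1, h2]; push_cast; norm_num
      · rw [show pvBlockedRun ((x :: xs) ++ 1 :: suf) s = pvBlockedRun (xs ++ 1 :: suf) (s + 1) by
          simp [pvBlockedRun, hx]]
        rw [ih (s + 1) hxs, pvCompVal_cons_ne x xs s hx]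
        simp only [List.length_cons]
        have : s + 1 + (xs.length : Int) + 1 = s + (((xs.length : Int)) + 1) + 1 := by ring
        rw [this]; push_cast; ring_nf

-- B computes the reference semantics
theorem pvBLoop_eq (rest : List Int) (s : Int) (acc : List (Int × Int)) :
    pvBLoop s rest acc = acc ++ pvBlockedRun rest s := by
  induction hn : rest.length using Nat.strong_induction_on generalizing rest s acc with
  | _ n ih =>
    rw [pvBLoop]
    split
    · rename_i k h
      obtain ⟨pre, suf, hsplit, hlen, hnot⟩ := (PySem.List.index?_eq_some_iff rest 1 k).mp h
      have htake : rest.take k = pre := by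
        subst hsplit; rw [← hlen]; simp
      have hdrop : rest.drop (k + 1) = suf := by
        subst hsplit; rw [← hlen]; simp
      have hlt : suf.length < n := by
        subst hsplit hn; simp; omega
      rw [htake, hdrop]
      have harith : s + (pre.length : Int) - 1 + 2 = s + (pre.length : Int) + 1 := by ring
      rw [harith, ih suf.length hlt suf _ _ rfl, pvCompartment_eq, hsplit,
        pvBlockedRun_split pre suf s hnot]
      simp [List.append_assoc]
    · rename_i h
      rw [pvCompartment_eq, pvBlockedRun_no_one rest s ((PySem.List.index?_eq_none_iff rest 1).mp h)]

-- finishing step of A (the trailing-compartment code after the loop)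
def pvFinishA (n : Int) (st : Bool × Int × List (Int × Int)) : List (Int × Int) :=
  if st.1 = false ∧ st.2.1 < n - 1 then st.2.2 ++ [(st.2.1, n - 1)] else st.2.2

-- A's fold computes the reference semantics
theorem pvFoldA_eq (l : List Int) (i : Int) (blocked : Bool) (start : Int) (acc : List (Int × Int)) :
    pvFinishA (i + (l.length : Int)) ((PySem.List.enumerate l i).foldl pvStepA (blocked, start, acc))
      = acc ++ (if blocked then pvBlockedRun l i else pvOpenRun start l i) := by
  induction l generalizing i blocked start acc with
  | nil =>
      cases blocked
      · simp only [PySem.List.enumerate_nil, List.foldl_nil, pvFinishA, pvOpenRun, List.length_nil]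
        norm_num
        split <;> simp
      · simp [PySem.List.enumerate_nil, pvFinishA, pvBlockedRun]
  | cons x xs ih =>
      rw [PySem.List.enumerate_cons, List.foldl_cons]
      have hlen : i + ((x :: xs).length : Int) = (i + 1) + (xs.length : Int) := by
        simp; ring
      rw [hlen]
      cases blocked
      · -- open state
        by_cases hx : x = 1
        · subst hx
          have hstep : pvStepA (false, start, acc) (i, 1) =
              (true, start, if start < i - 1 then acc ++ [(start, i - 1)] else acc) := by
            simp [pvStepA]
          rw [hstep, ih]
          simp only [pvOpenRun, if_pos rfl]
          split <;> simp
        · have hstep : pvStepA (false, start, acc) (i, x) = (false, start, acc) := by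
            simp [pvStepA, hx]
          rw [hstep, ih]
          simp [pvOpenRun, hx]
      · -- blocked state
        by_cases hx : x = 0
        · subst hx
          have hstep : pvStepA (true, start, acc) (i, 0) = (false, i, acc) := by
            simp [pvStepA]
          rw [hstep, ih]
          simp [pvBlockedRun]
        · have hstep : pvStepA (true, start, acc) (i, x) = (true, start, acc) := by
            simp [pvStepA, hx]
          rw [hstep, ih]
          simp [pvBlockedRun, hx]

theorem get_compartment_limits_eq_run (v : List Int) :
    get_compartment_limits v = pvBlockedRun v 0 := by
  have := pvFoldA_eq v 0 true 0 []
  simp only [zero_add, if_pos, List.nil_append] at this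
  unfold get_compartment_limits
  rw [show PySem.List.enumerate v = PySem.List.enumerate v 0 from rfl]
  rw [show (if ((PySem.List.enumerate v 0).foldl pvStepA (true, 0, [])).1 = false ∧
        ((PySem.List.enumerate v 0).foldl pvStepA (true, 0, [])).2.1 < (v.length : Int) - 1 then
        ((PySem.List.enumerate v 0).foldl pvStepA (true, 0, [])).2.2 ++
          [(((PySem.List.enumerate v 0).foldl pvStepA (true, 0, [])).2.1, (v.length : Int) - 1)]
      else ((PySem.List.enumerate v 0).foldl pvStepA (true, 0, [])).2.2)
      = pvFinishA (0 + (v.length : Int)) ((PySem.List.enumerate v 0).foldl pvStepA (true, 0, []))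
    by simp [pvFinishA]]
  rw [zero_add]
  exact this

-- ===== VERDICT (by name: the statement is the Claim_ definition above) =====
theorem get_compartment_limits_spec : Claim_equal_get_compartment_limits := by
  intro v _
  unfold Spec_get_compartment_limits get_compartment_limits_alt
  rw [pvBLoop_eq, get_compartment_limits_eq_run]
  simp
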